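-- pv_equiv track=rewrite | github.com/mclaughlinliam3/NetTracer3D | nettracer_code/src/nettracer3d/napari_viewer_widget.py | _merge_bboxes
-- ===== SOURCE A (Python) =====
-- def _merge_bboxes(bb_list):
--     """Return a single (z0,z1,y0,y1,x0,x1) enclosing all bboxes."""
--     z0 = min(b[0] for b in bb_list)
--     z1 = max(b[1] for b in bb_list)
--     y0 = min(b[2] for b in bb_list)
--     y1 = max(b[3] for b in bb_list)
--     x0 = min(b[4] for b in bb_list)
--     x1 = max(b[5] for b in bb_list)
--     return (z0, z1, y0, y1, x0, x1)
-- ===== SOURCE B (Python) =====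
-- def _merge_bboxes(bb_list):
--     """Return a single (z0,z1,y0,y1,x0,x1) enclosing all bboxes."""
--     z0, z1, y0, y1, x0, x1 = bb_list[0]
--     for b in bb_list[1:]:
--         if b[0] < z0: z0 = b[0]
--         if b[1] > z1: z1 = b[1]
--         if b[2] < y0: y0 = b[2]
--         if b[3] > y1: y1 = b[3]
--         if b[4] < x0: x0 = b[4]
--         if b[5] > x1: x1 = b[5]
--     return (z0, z1, y0, y1, x0, x1)
-- ===== Notes on version B (the rewrite author's own statement) =====
-- stated objective: alternative
-- what changed: Replaces six separate min/max generator scans of the list with a single pass that threads all six running extrema through one loop.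
import Mathlib
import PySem

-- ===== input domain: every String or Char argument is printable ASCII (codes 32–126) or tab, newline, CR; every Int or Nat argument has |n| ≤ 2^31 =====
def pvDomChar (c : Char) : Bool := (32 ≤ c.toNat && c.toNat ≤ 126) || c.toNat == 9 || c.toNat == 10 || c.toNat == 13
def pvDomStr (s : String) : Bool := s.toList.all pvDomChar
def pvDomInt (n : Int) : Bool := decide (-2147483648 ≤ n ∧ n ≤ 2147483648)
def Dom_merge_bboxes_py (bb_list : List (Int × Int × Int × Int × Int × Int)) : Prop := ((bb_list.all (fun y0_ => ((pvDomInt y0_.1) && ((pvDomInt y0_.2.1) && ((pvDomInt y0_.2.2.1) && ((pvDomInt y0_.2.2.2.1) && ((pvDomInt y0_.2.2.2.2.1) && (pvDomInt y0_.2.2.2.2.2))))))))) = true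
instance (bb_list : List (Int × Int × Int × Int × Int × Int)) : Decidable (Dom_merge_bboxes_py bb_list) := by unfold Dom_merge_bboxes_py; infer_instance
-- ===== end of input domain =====

-- B makes one pass threading all six running extrema, instead of A's six separate min/max scans;
-- equal cost, different loop structure. Pre_ excludes only the empty list, where A raises ValueError.

-- ===== PORT A =====
-- A: six independent generator scans, one min or max each (min/max of an empty list raises; Pre_ excludes []).
def merge_bboxes_py (bb_list : List (Int × Int × Int × Int × Int × Int)) : Int × Int × Int × Int × Int × Int :=
  ( (PySem.List.min? (bb_list.map (fun b => b.1)) (fun v => v)).getD 0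
  , (PySem.List.max? (bb_list.map (fun b => b.2.1)) (fun v => v)).getD 0
  , (PySem.List.min? (bb_list.map (fun b => b.2.2.1)) (fun v => v)).getD 0
  , (PySem.List.max? (bb_list.map (fun b => b.2.2.2.1)) (fun v => v)).getD 0
  , (PySem.List.min? (bb_list.map (fun b => b.2.2.2.2.1)) (fun v => v)).getD 0
  , (PySem.List.max? (bb_list.map (fun b => b.2.2.2.2.2)) (fun v => v)).getD 0 )

-- ===== PORT B =====
-- B: first box as accumulator, one fold over the tail updating each bound by comparison.
def merge_bboxes_py_alt (bb_list : List (Int × Int × Int × Int × Int × Int)) : Int × Int × Int × Int × Int × Int :=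
  match bb_list with
  | [] => (0, 0, 0, 0, 0, 0)   -- unreachable under Pre_ (Python B raises IndexError here)
  | h :: t =>
    t.foldl (fun acc b =>
      ( if b.1 < acc.1 then b.1 else acc.1
      , if b.2.1 > acc.2.1 then b.2.1 else acc.2.1
      , if b.2.2.1 < acc.2.2.1 then b.2.2.1 else acc.2.2.1
      , if b.2.2.2.1 > acc.2.2.2.1 then b.2.2.2.1 else acc.2.2.2.1
      , if b.2.2.2.2.1 < acc.2.2.2.2.1 then b.2.2.2.2.1 else acc.2.2.2.2.1
      , if b.2.2.2.2.2 > acc.2.2.2.2.2 then b.2.2.2.2.2 else acc.2.2.2.2.2 )) h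

-- ===== PRECONDITION & SPEC =====
-- Pre_ excludes exactly the empty list, on which A raises ValueError (min() of empty sequence).
def Pre_merge_bboxes_py (bb_list : List (Int × Int × Int × Int × Int × Int)) : Prop := bb_list ≠ []
instance (bb_list : List (Int × Int × Int × Int × Int × Int)) : Decidable (Pre_merge_bboxes_py bb_list) := by unfold Pre_merge_bboxes_py; infer_instance
def pvWitness_merge_bboxes_py : (List (Int × Int × Int × Int × Int × Int)) := [(0, 4, 1, 5, 2, 6), (-1, 3, 2, 9, 0, 1)]
def Spec_merge_bboxes_py (bb_list : List (Int × Int × Int × Int × Int × Int)) (out : Int × Int × Int × Int × Int × Int) : Prop := out = merge_bboxes_py_alt bb_list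
instance (bb_list : List (Int × Int × Int × Int × Int × Int)) (out : Int × Int × Int × Int × Int × Int) : Decidable (Spec_merge_bboxes_py bb_list out) := by unfold Spec_merge_bboxes_py; infer_instance

-- ===== CLAIM (what is proved, stated in full; the proofs are below) =====
def Claim_equal_merge_bboxes_py : Prop := ∀ (bb_list : List (Int × Int × Int × Int × Int × Int)), Dom_merge_bboxes_py bb_list → Pre_merge_bboxes_py bb_list → Spec_merge_bboxes_py bb_list (merge_bboxes_py bb_list)

-- ===== LEMMAS AND PROOFS =====

theorem if_lt_eq_min (a b : Int) : (if b < a then b else a) = min a b := by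
  simp only [min_def]; split_ifs <;> omega

theorem if_gt_eq_max (a b : Int) : (if b > a then b else a) = max a b := by
  simp only [max_def]; split_ifs <;> omega

-- B's combined fold computes the six componentwise min/max folds.
theorem fold6_eq (t : List (Int × Int × Int × Int × Int × Int)) (h : Int × Int × Int × Int × Int × Int) :
    t.foldl (fun acc b =>
      ( if b.1 < acc.1 then b.1 else acc.1
      , if b.2.1 > acc.2.1 then b.2.1 else acc.2.1
      , if b.2.2.1 < acc.2.2.1 then b.2.2.1 else acc.2.2.1
      , if b.2.2.2.1 > acc.2.2.2.1 then b.2.2.2.1 else acc.2.2.2.1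
      , if b.2.2.2.2.1 < acc.2.2.2.2.1 then b.2.2.2.2.1 else acc.2.2.2.2.1
      , if b.2.2.2.2.2 > acc.2.2.2.2.2 then b.2.2.2.2.2 else acc.2.2.2.2.2 )) h
    = ( (t.map (fun b => b.1)).foldl min h.1
      , (t.map (fun b => b.2.1)).foldl max h.2.1
      , (t.map (fun b => b.2.2.1)).foldl min h.2.2.1
      , (t.map (fun b => b.2.2.2.1)).foldl max h.2.2.2.1
      , (t.map (fun b => b.2.2.2.2.1)).foldl min h.2.2.2.2.1
      , (t.map (fun b => b.2.2.2.2.2)).foldl max h.2.2.2.2.2 ) := by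
  have hf : (fun (acc b : Int × Int × Int × Int × Int × Int) =>
      ( if b.1 < acc.1 then b.1 else acc.1
      , if b.2.1 > acc.2.1 then b.2.1 else acc.2.1
      , if b.2.2.1 < acc.2.2.1 then b.2.2.1 else acc.2.2.1
      , if b.2.2.2.1 > acc.2.2.2.1 then b.2.2.2.1 else acc.2.2.2.1
      , if b.2.2.2.2.1 < acc.2.2.2.2.1 then b.2.2.2.2.1 else acc.2.2.2.2.1
      , if b.2.2.2.2.2 > acc.2.2.2.2.2 then b.2.2.2.2.2 else acc.2.2.2.2.2 ))
      = (fun acc b =>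
      ( min acc.1 b.1, max acc.2.1 b.2.1, min acc.2.2.1 b.2.2.1
      , max acc.2.2.2.1 b.2.2.2.1, min acc.2.2.2.2.1 b.2.2.2.2.1, max acc.2.2.2.2.2 b.2.2.2.2.2 )) := by
    funext acc b
    simp only [if_lt_eq_min, if_gt_eq_max]
  rw [hf]
  induction t generalizing h with
  | nil => rfl
  | cons b t ih =>
    simp only [List.foldl_cons, List.map_cons]
    simpa using ih _

theorem merge_bboxes_py_spec : Claim_equal_merge_bboxes_py := by
  intro bb_list _dom hpre
  unfold Spec_merge_bboxes_py merge_bboxes_py merge_bboxes_py_alt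
  match bb_list with
  | [] => exact absurd rfl hpre
  | h :: t =>
    simp only [List.map_cons, PySem.List.min?_id_cons, PySem.List.max?_id_cons, Option.getD_some,
      fold6_eq]
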